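-- pv_equiv track=rewrite | github.com/aszkiel71/uwr | 01_session/wdi (introduction to cs)/wdi_fifth_list/task7.py | task7
-- ===== SOURCE A (Python) =====
-- def task7(n, m):
--     if m <= 1:
--         return 0
--
--     i = 0
--     power = n
--     while power < m:
--         i += 1
--         power = power ** 2  # n^(2^i)
--
--
--     low = 2 ** (i - 1)
--     high = 2 ** i
--
--
--     while low < high:
--         mid = (low + high) // 2
--         if n ** mid >= m:
--             high = mid
--         else:
--             low = mid + 1
--
--     return low
-- ===== SOURCE B (Python) =====
-- def task7(n, m):
--     if m <= 1:
--         return 0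
--     p = 1
--     k = 0
--     while p < m:
--         p *= n
--         k += 1
--     return k
-- ===== Notes on version B (the rewrite author's own statement) =====
-- stated objective: simpler
-- what changed: Replaced the exponential bracketing loop plus binary search (which also goes through Python floats via 2**(i-1) when i==0) with a single linear loop that accumulates the running power n**k and counts k.
-- outside the precondition, e.g. on task7(5, 3): A returns 1.0, B returns 1
import Mathlib
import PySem

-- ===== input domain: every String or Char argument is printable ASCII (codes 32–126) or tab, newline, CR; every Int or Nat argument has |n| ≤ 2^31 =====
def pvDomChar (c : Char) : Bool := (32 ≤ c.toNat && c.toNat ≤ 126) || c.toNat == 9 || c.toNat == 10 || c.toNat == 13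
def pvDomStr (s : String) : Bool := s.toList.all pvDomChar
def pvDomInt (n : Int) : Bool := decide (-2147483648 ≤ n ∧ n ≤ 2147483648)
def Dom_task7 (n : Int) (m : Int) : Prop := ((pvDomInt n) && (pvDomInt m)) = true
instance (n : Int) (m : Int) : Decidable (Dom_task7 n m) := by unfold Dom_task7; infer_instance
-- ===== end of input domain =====

-- B replaces A's exponential-bracketing + binary-search machinery by one linear loop that
-- accumulates the running power and counts the exponent (simpler; return values only).

-- ===== PORT A =====
-- `while power < m: i += 1; power = power ** 2`; fuel 100 is ample: on Pre_/Dom the loop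
-- stops after at most 6 iterations (|n| ≥ 2, m ≤ 2^31).
def task7Bracket (m : Int) : Nat → Nat → Int → Nat
  | 0, i, _ => i
  | fuel+1, i, power => if power < m then task7Bracket m fuel (i+1) (power^2) else i

-- the binary search; `n ** mid` is ported as `n ^ mid.toNat`, exact since 0 ≤ mid in
-- every reachable state (low starts at 2^(i-1) ≥ 0).
def task7Bisect (n : Int) (m : Int) : Nat → Int → Int → Int
  | 0, low, _ => low
  | fuel+1, low, high =>
    if low < high then
      let mid := PySem.Int.floordiv (low + high) 2
      if m ≤ n ^ mid.toNat then task7Bisect n m fuel low mid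
      else task7Bisect n m fuel (mid+1) high
    else low

-- `2 ** (i - 1)` uses Nat subtraction; on Pre_ (n < m) the bracketing loop runs at least
-- once, so i ≥ 1 and this matches Python's integer 2**(i-1) exactly.
def task7 (n : Int) (m : Int) : Int :=
  if m ≤ 1 then 0
  else
    let i := task7Bracket m 100 0 n
    task7Bisect n m 100 ((2:Int)^(i-1)) ((2:Int)^i)

-- ===== PORT B =====
-- `while p < m: p *= n; k += 1`; fuel 100 is ample: on Pre_/Dom at most 32 iterations.
def task7AltLoop (n : Int) (m : Int) : Nat → Int → Nat → Nat
  | 0, _, k => k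
  | fuel+1, p, k => if p < m then task7AltLoop n m fuel (p*n) (k+1) else k

def task7_alt (n : Int) (m : Int) : Int :=
  if m ≤ 1 then 0 else ((task7AltLoop n m 100 1 0 : Nat) : Int)

-- ===== PRECONDITION & SPEC =====
-- Pre_ excludes (a) n ∈ {-1,0,1} with m > 1, where A (and B) loop forever, and
-- (b) 1 < m ≤ n, where A's `2 ** (i - 1)` with i = 0 is the float 0.5 and A returns the
-- float 1.0 instead of an int.
def Pre_task7 (n : Int) (m : Int) : Prop := 1 < m → ((n < -1 ∨ 1 < n) ∧ n < m)
instance (n : Int) (m : Int) : Decidable (Pre_task7 n m) := by unfold Pre_task7; infer_instance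
def pvWitness_task7 : Int × Int := (2, 5)

def Spec_task7 (n : Int) (m : Int) (out : Int) : Prop := out = task7_alt n m
instance (n : Int) (m : Int) (out : Int) : Decidable (Spec_task7 n m out) := by unfold Spec_task7; infer_instance

-- ===== CLAIM (what is proved, stated in full; the proofs are below) =====
def Claim_equal_task7 : Prop := ∀ (n : Int) (m : Int), Dom_task7 n m → Pre_task7 n m → Spec_task7 n m (task7 n m)

-- ===== LEMMAS AND PROOFS =====

-- t abbreviates the least exponent with m ≤ n^t throughout; e says whether n < 0.

-- abstract model of A's bracketing loop: continue while 2^i < t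
def pvBModel (t : Nat) : Nat → Nat → Nat
  | 0, i => i
  | fuel+1, i => if 2 ^ i < t then pvBModel t fuel (i+1) else i

-- abstract model of A's binary search: the test m ≤ n^mid becomes t ≤ mid ∧ (e → mid even)
def pvSModel (t : Nat) (e : Bool) : Nat → Int → Int → Int
  | 0, low, _ => low
  | fuel+1, low, high =>
    if low < high then
      let mid := PySem.Int.floordiv (low + high) 2
      if t ≤ mid.toNat ∧ (e = true → mid.toNat % 2 = 0) then pvSModel t e fuel low mid
      else pvSModel t e fuel (mid+1) high
    else low

-- characterisation of the comparison m ≤ n^k via the least such exponent t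
theorem pv_char (n m : Int) (hn : 2 ≤ |n|) (hm : 1 < m) (t : Nat)
    (ht : m ≤ n ^ t) (hmin : ∀ j, j < t → n ^ j < m) (k : Nat) :
    m ≤ n ^ k ↔ (t ≤ k ∧ (n < 0 → k % 2 = 0)) := by
  have habs1 : (1:Int) ≤ |n| := by omega
  constructor
  · intro h
    constructor
    · by_contra hlt
      exact absurd h (not_le.mpr (hmin k (by omega)))
    · intro hneg
      by_contra hodd
      have : Odd k := Nat.odd_iff.mpr (by omega)
      have := this.pow_neg hneg
      omega
  · rintro ⟨htk, hpar⟩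
    rcases lt_or_ge n 0 with hneg | hpos
    · have hkE : Even k := Nat.even_iff.mpr (hpar hneg)
      have htE : Even t := by
        rcases Nat.even_or_odd t with hE | hO
        · exact hE
        · have := hO.pow_neg hneg
          omega
      calc m ≤ n ^ t := ht
        _ = |n| ^ t := (htE.pow_abs n).symm
        _ ≤ |n| ^ k := pow_le_pow_right₀ habs1 htk
        _ = n ^ k := hkE.pow_abs n
    · have h2 : (2:Int) ≤ n := by rw [abs_of_nonneg hpos] at hn; exact hn
      have h1 : n ^ t ≤ n ^ k := pow_le_pow_right₀ (by omega) htk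
      omega

theorem pv_bracket_eq (n m : Int) (hn : 2 ≤ |n|) (hm : 1 < m) (t : Nat)
    (ht : m ≤ n ^ t) (hmin : ∀ j, j < t → n ^ j < m) (ht2 : 2 ≤ t) :
    ∀ fuel i, task7Bracket m fuel i (n ^ (2 ^ i)) = pvBModel t fuel i := by
  intro fuel
  induction fuel with
  | zero => intro i; rfl
  | succ f ih =>
    intro i
    have hcond : (n ^ (2 ^ i) < m) ↔ (2 ^ i < t) := by
      rw [← not_le, pv_char n m hn hm t ht hmin]
      rcases Nat.eq_zero_or_pos i with h0 | h1
      · subst h0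
        exact iff_of_true (fun hc => by have := hc.1; simp at this; omega)
          (by simpa using (by omega : 1 < t))
      · have he : (2:Nat) ^ i % 2 = 0 := by
          have h2 : (2:Nat) ^ i = 2 * 2 ^ (i-1) := by
            rw [← pow_succ']
            congr 1
            omega
          omega
        exact ⟨fun h => by by_contra hc; exact h ⟨by omega, fun _ => he⟩,
               fun h hc => absurd hc.1 (by omega)⟩
    have hsq : (n ^ (2 ^ i)) ^ 2 = n ^ (2 ^ (i+1)) := by
      rw [← pow_mul, ← pow_succ]
    simp only [task7Bracket, pvBModel, hcond, hsq]
    split_ifs with h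
    · exact ih (i+1)
    · rfl

theorem pv_bisect_eq (n m : Int) (hn : 2 ≤ |n|) (hm : 1 < m) (t : Nat)
    (ht : m ≤ n ^ t) (hmin : ∀ j, j < t → n ^ j < m) :
    ∀ fuel (low high : Int), 0 ≤ low →
      task7Bisect n m fuel low high = pvSModel t (decide (n < 0)) fuel low high := by
  intro fuel
  induction fuel with
  | zero => intro low high _; rfl
  | succ f ih =>
    intro low high hlow
    have hcond : (m ≤ n ^ (PySem.Int.floordiv (low + high) 2).toNat) ↔
        (t ≤ (PySem.Int.floordiv (low + high) 2).toNat ∧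
          (decide (n < 0) = true → (PySem.Int.floordiv (low + high) 2).toNat % 2 = 0)) := by
      rw [pv_char n m hn hm t ht hmin]
      simp
    simp only [task7Bisect, pvSModel]
    split_ifs with hlh hA hB hB
    · exact ih _ _ hlow
    · exact absurd (hcond.mp hA) hB
    · exact absurd (hcond.mpr hB) hA
    · have hmid := PySem.Int.floordiv_two_mid_bounds (le_of_lt hlh)
      exact ih _ _ (by omega)
    · rfl

theorem pv_alt_eq (n m : Int) (t : Nat)
    (ht : m ≤ n ^ t) (hmin : ∀ j, j < t → n ^ j < m) :
    ∀ fuel k, k ≤ t → t ≤ k + fuel → task7AltLoop n m fuel (n ^ k) k = t := by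
  intro fuel
  induction fuel with
  | zero => intro k h1 h2; simp only [task7AltLoop]; omega
  | succ f ih =>
    intro k h1 h2
    simp only [task7AltLoop]
    split_ifs with h
    · have hkt : k < t := by
        rcases Nat.lt_or_ge k t with hlt | hge
        · exact hlt
        · have : k = t := by omega
          subst this
          omega
      have : n ^ k * n = n ^ (k+1) := (pow_succ n k).symm
      rw [this]
      exact ih (k+1) (by omega) (by omega)
    · have : t ≤ k := by
        by_contra hc
        exact absurd (hmin k (by omega)) (by omega)
      omega

-- the finite numeric core: for every admissible t and parity flag, A's two abstract loops
-- compute exactly t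
theorem pv_keyfact : ∀ t : Nat, t < 33 → 2 ≤ t → ∀ e : Bool, (e = true → t % 2 = 0) →
    pvSModel t e 100 ((2:Int) ^ (pvBModel t 100 0 - 1)) ((2:Int) ^ (pvBModel t 100 0)) = (t : Int) := by
  decide

-- ===== VERDICT (by name: the statement is the Claim_ definition above) =====
theorem task7_spec : Claim_equal_task7 := by
  intro n m hdom hpre
  unfold Spec_task7 task7 task7_alt
  by_cases hm : m ≤ 1
  · simp [hm]
  · have hm' : 1 < m := by omega
    obtain ⟨hn, hnm⟩ := hpre hm'
    have habs : 2 ≤ |n| := by rcases hn with h | h <;> [rw [abs_of_neg (by omega)]; rw [abs_of_pos (by omega)]] <;> omega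
    have hdm : m ≤ 2147483648 := by
      have := hdom
      unfold Dom_task7 pvDomInt at this
      simp only [Bool.and_eq_true, decide_eq_true_eq] at this
      omega
    have h32 : m ≤ n ^ 32 := by
      have he : Even 32 := by decide
      have h1 : (2:Int) ^ 32 ≤ |n| ^ 32 := pow_le_pow_left₀ (by omega) habs 32
      rw [he.pow_abs] at h1
      have : (2:Int) ^ 32 = 4294967296 := by norm_num
      omega
    have hex : ∃ k : Nat, m ≤ n ^ k := ⟨32, h32⟩
    set t := Nat.find hex with htdef
    have ht : m ≤ n ^ t := Nat.find_spec hex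
    have hmin : ∀ j, j < t → n ^ j < m := by
      intro j hj
      have := Nat.find_min hex hj
      omega
    have ht32 : t ≤ 32 := Nat.find_min' hex h32
    have ht2 : 2 ≤ t := by
      have h0 : n ^ 0 < m := by simp; omega
      have h1 : n ^ 1 < m := by simpa using hnm
      by_contra hc
      interval_cases t <;> omega
    have htpar : decide (n < 0) = true → t % 2 = 0 := by
      intro hneg
      simp only [decide_eq_true_eq] at hneg
      by_contra hodd
      have : Odd t := Nat.odd_iff.mpr (by omega)
      have := this.pow_neg hneg
      omega
    have hA1 : task7Bracket m 100 0 n = pvBModel t 100 0 := by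
      have := pv_bracket_eq n m habs hm' t ht hmin ht2 100 0
      simpa using this
    simp only [if_neg (by omega : ¬ m ≤ 1)]
    rw [hA1,
        pv_bisect_eq n m habs hm' t ht hmin 100 _ _ (by positivity),
        pv_keyfact t (by omega) ht2 (decide (n < 0)) htpar]
    have hB : task7AltLoop n m 100 1 0 = t := by
      have := pv_alt_eq n m t ht hmin 100 0 (by omega) (by omega)
      simpa using this
    rw [hB]
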